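-- pv_equiv track=rewrite | github.com/Mactto/Algorithm | programmers/숫자짝궁.py | solution
-- ===== SOURCE A (Python) =====
-- def solution(X, Y):
--     answer = ''
--
--     X = list(map(int, X))
--     Y = list(map(int, Y))
--
--     for i in range(9, -1, -1):
--         if i == 0 and min(X.count(i), Y.count(i)) > 0 and answer == '':
--             answer += '0'
--         else:
--             answer += str(i) * min(X.count(i), Y.count(i))
--
--     return answer if answer != '' else '-1'
-- ===== SOURCE B (Python) =====
-- def solution(X, Y):
--     xs = sorted(map(int, X), reverse=True)
--     ys = sorted(map(int, Y), reverse=True)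
--     out = []
--     i = j = 0
--     while i < len(xs) and j < len(ys):
--         if xs[i] == ys[j]:
--             out.append(xs[i])
--             i += 1
--             j += 1
--         elif xs[i] > ys[j]:
--             i += 1
--         else:
--             j += 1
--     if not out:
--         return '-1'
--     if out[0] == 0:
--         return '0'
--     return ''.join(map(str, out))
-- ===== Notes on version B (the rewrite author's own statement) =====
-- stated objective: alternative
-- what changed: B sorts both digit lists descending and intersects them with a two-pointer merge that emits the shared digits already in order, then collapses the empty/all-zero result afterwards, instead of A's ten per-digit count-and-append passes with an in-loop leading-zero special case.
import Mathlib
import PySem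

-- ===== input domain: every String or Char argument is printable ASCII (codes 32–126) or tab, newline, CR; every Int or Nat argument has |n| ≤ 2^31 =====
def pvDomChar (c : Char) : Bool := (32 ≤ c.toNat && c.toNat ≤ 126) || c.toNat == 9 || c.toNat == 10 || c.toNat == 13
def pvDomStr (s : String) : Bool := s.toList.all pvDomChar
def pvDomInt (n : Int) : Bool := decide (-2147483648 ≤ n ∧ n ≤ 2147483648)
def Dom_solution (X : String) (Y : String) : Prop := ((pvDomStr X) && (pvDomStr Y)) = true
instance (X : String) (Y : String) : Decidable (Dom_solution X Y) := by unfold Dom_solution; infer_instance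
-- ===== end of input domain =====

-- B sorts both digit lists descending and intersects them with a two-pointer merge (emitting
-- the shared digits already in order), collapsing the empty / all-zero cases afterwards,
-- instead of A's ten per-digit count-and-append passes with an in-loop leading-zero special case.

-- ===== PORT A =====
-- int(c) for a single digit character c (Pre_ admits only digit characters, where this is exact)
def pvDigitVal (c : Char) : Int := (c.toNat : Int) - 48
def solution (X : String) (Y : String) : String :=
  let Xl := X.toList.map pvDigitVal
  let Yl := Y.toList.map pvDigitVal
  let answer := (PySem.List.pyRange 9 (-1) (-1)).foldl (fun answer i =>
    if i == 0 && decide (0 < min (Xl.count i) (Yl.count i)) && answer == ([] : List Char) then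
      answer ++ ['0']
    else
      answer ++ PySem.List.pyRepeat (PySem.Int.toStr i).toList
                  (min (Xl.count i) (Yl.count i) : Int)) ([] : List Char)
  if answer ≠ ([] : List Char) then String.ofList answer else "-1"

-- ===== PORT B =====
-- str(v) as a character list (the ''.join(map(str, out)) step)
def pvToC (v : Int) : List Char := (PySem.Int.toStr v).toList
-- the while loop with the two index pointers i, j, transcribed as recursion on the two suffixes
def pvMerge : List Int → List Int → List Int
  | [], _ => []
  | _ :: _, [] => []
  | x :: xs, y :: ys =>
    if x == y then x :: pvMerge xs ys
    else if y < x then pvMerge xs (y :: ys)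
    else pvMerge (x :: xs) ys

def solution_alt (X : String) (Y : String) : String :=
  let xs := PySem.List.sorted (X.toList.map pvDigitVal) (fun v => v) true
  let ys := PySem.List.sorted (Y.toList.map pvDigitVal) (fun v => v) true
  let out := pvMerge xs ys
  match out with
  | [] => "-1"
  | v :: rest => if v == 0 then "0" else String.ofList ((v :: rest).flatMap pvToC)

-- ===== PRECONDITION & SPEC =====
-- Pre_: every character of X and Y is an ASCII digit; on any other character both Pythons
-- raise ValueError in int(), so those inputs are excluded.
def Pre_solution (X : String) (Y : String) : Prop :=
  (X.toList.all Char.isDigit && Y.toList.all Char.isDigit) = true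
instance (X : String) (Y : String) : Decidable (Pre_solution X Y) := by
  unfold Pre_solution; infer_instance

def pvWitness_solution : String × String := ("12345", "291053")

def Spec_solution (X : String) (Y : String) (out : String) : Prop := out = solution_alt X Y
instance (X : String) (Y : String) (out : String) : Decidable (Spec_solution X Y out) := by
  unfold Spec_solution; infer_instance

-- ===== CLAIM (what is proved, stated in full; the proofs are below) =====
def Claim_equal_solution : Prop :=
  ∀ (X : String) (Y : String), Dom_solution X Y → Pre_solution X Y →
    Spec_solution X Y (solution X Y)

-- ===== LEMMAS AND PROOFS =====

def pvDigitsI : List Int := [9,8,7,6,5,4,3,2,1,0]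
def pvCanon (f : Int → Nat) : List Int := pvDigitsI.flatMap (fun v => List.replicate (f v) v)

theorem digitVal_bounds (c : Char) (h : c.isDigit = true) :
    0 ≤ pvDigitVal c ∧ pvDigitVal c ≤ 9 := by
  simp [Char.isDigit, UInt32.le_iff_toNat_le] at h
  unfold pvDigitVal
  omega

theorem mem_digitsI (v : Int) (h0 : 0 ≤ v) (h9 : v ≤ 9) : v ∈ pvDigitsI := by
  have : v = 0 ∨ v = 1 ∨ v = 2 ∨ v = 3 ∨ v = 4 ∨ v = 5 ∨ v = 6 ∨ v = 7 ∨ v = 8 ∨ v = 9 := by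
    omega
  rcases this with h|h|h|h|h|h|h|h|h|h <;> rw [h] <;> decide

-- the canonical descending digit list is a permutation of any 0..9-valued list with those counts
theorem canon_perm (l : List Int) (hd : ∀ v ∈ l, 0 ≤ v ∧ v ≤ 9) :
    (pvCanon (fun v => l.count v)).Perm l := by
  rw [List.perm_iff_count]
  intro a
  by_cases ha : a ∈ pvDigitsI
  · fin_cases ha <;>
      simp [pvCanon, pvDigitsI, List.count_append, List.count_replicate]
  · have h0 : l.count a = 0 := by
      rw [List.count_eq_zero]
      intro hmem
      exact ha (mem_digitsI a (hd a hmem).1 (hd a hmem).2)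
    simp only [pvDigitsI, List.mem_cons, List.not_mem_nil, or_false] at ha
    push Not at ha
    obtain ⟨h9,h8,h7,h6,h5,h4,h3,h2,h1,hz⟩ := ha
    simp [pvCanon, pvDigitsI, List.count_append, List.count_replicate, h0]
    exact ⟨fun h => absurd h.symm h9, fun h => absurd h.symm h8, fun h => absurd h.symm h7,
      fun h => absurd h.symm h6, fun h => absurd h.symm h5, fun h => absurd h.symm h4,
      fun h => absurd h.symm h3, fun h => absurd h.symm h2, fun h => absurd h.symm h1,
      fun h => absurd h.symm hz⟩

theorem flat_pairwise (cs : List Int) (hcs : cs.Pairwise (fun a b => b < a)) (f : Int → Nat) :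
    (cs.flatMap (fun v => List.replicate (f v) v)).Pairwise (fun a b => b ≤ a) := by
  induction cs with
  | nil => simp
  | cons c cs ih =>
    rw [List.pairwise_cons] at hcs
    simp only [List.flatMap_cons]
    rw [List.pairwise_append]
    refine ⟨(List.pairwise_replicate).mpr (Or.inr le_rfl), ih hcs.2, ?_⟩
    intro a ha b hb
    obtain rfl := List.eq_of_mem_replicate ha
    obtain ⟨d, hd', hb'⟩ := List.mem_flatMap.mp hb
    have hbd := List.eq_of_mem_replicate hb'
    exact le_of_lt (by rw [hbd]; exact hcs.1 d hd')

theorem canon_pairwise (f : Int → Nat) :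
    (pvCanon f).Pairwise (fun a b => b ≤ a) :=
  flat_pairwise pvDigitsI (by decide) f

-- sorted(·, reverse=True) of a 0..9-valued list is the canonical descending list
theorem sorted_rev_eq_canon (l : List Int) (hd : ∀ v ∈ l, 0 ≤ v ∧ v ≤ 9) :
    PySem.List.sorted l (fun v => v) true = pvCanon (fun v => l.count v) :=
  List.Perm.eq_of_pairwise (fun _ _ _ _ h1 h2 => le_antisymm h2 h1)
    (PySem.List.sorted_pairwise_rev l (fun v => v)) (canon_pairwise _)
    ((PySem.List.sorted_perm l (fun v => v) true).trans (canon_perm l hd).symm)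

theorem merge_nil_right (xs : List Int) : pvMerge xs [] = [] := by
  cases xs <;> simp [pvMerge]

theorem merge_skip_right (c : Int) (b : Nat) (ys xs : List Int)
    (hx : ∀ x ∈ xs, x < c) :
    pvMerge xs (List.replicate b c ++ ys) = pvMerge xs ys := by
  induction b with
  | zero => simp
  | succ b ih =>
    cases xs with
    | nil => simp [pvMerge]
    | cons x xs' =>
      have hxc : x < c := hx x List.mem_cons_self
      rw [List.replicate_succ, List.cons_append]
      show pvMerge (x :: xs') (c :: (List.replicate b c ++ ys)) = _
      rw [pvMerge]
      rw [if_neg (by simp [ne_of_lt hxc]), if_neg (by simp [not_lt.mpr (le_of_lt hxc)])]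
      exact ih

theorem merge_skip_left (c : Int) (a : Nat) (xs ys : List Int)
    (hy : ∀ y ∈ ys, y < c) :
    pvMerge (List.replicate a c ++ xs) ys = pvMerge xs ys := by
  induction a with
  | zero => simp
  | succ a ih =>
    cases ys with
    | nil => rw [merge_nil_right, merge_nil_right]
    | cons y ys' =>
      have hyc : y < c := hy y List.mem_cons_self
      rw [List.replicate_succ, List.cons_append]
      show pvMerge (c :: (List.replicate a c ++ xs)) (y :: ys') = _
      rw [pvMerge]
      rw [if_neg (by simp [(ne_of_lt hyc).symm]), if_pos (by simp [hyc])]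
      exact ih

theorem merge_rep (c : Int) (a b : Nat) (xs ys : List Int)
    (hx : ∀ x ∈ xs, x < c) (hy : ∀ y ∈ ys, y < c) :
    pvMerge (List.replicate a c ++ xs) (List.replicate b c ++ ys)
      = List.replicate (min a b) c ++ pvMerge xs ys := by
  induction a generalizing b with
  | zero => simpa using merge_skip_right c b ys xs hx
  | succ a ih =>
    cases b with
    | zero => simpa using merge_skip_left c (a+1) xs ys hy
    | succ b =>
      rw [List.replicate_succ, List.replicate_succ, List.cons_append, List.cons_append]
      show pvMerge (c :: _) (c :: _) = _
      rw [pvMerge, if_pos (by simp), ih b, Nat.succ_min_succ, List.replicate_succ,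
        List.cons_append]

theorem merge_flat (cs : List Int) (hcs : cs.Pairwise (fun a b => b < a)) (f g : Int → Nat) :
    pvMerge (cs.flatMap (fun v => List.replicate (f v) v))
            (cs.flatMap (fun v => List.replicate (g v) v))
      = cs.flatMap (fun v => List.replicate (min (f v) (g v)) v) := by
  induction cs with
  | nil => simp [pvMerge]
  | cons c cs ih =>
    rw [List.pairwise_cons] at hcs
    have hlt : ∀ (h : Int → Nat) x, x ∈ cs.flatMap (fun d => List.replicate (h d) d) → x < c := by
      intro h x hxm
      obtain ⟨d, hd, hx'⟩ := List.mem_flatMap.mp hxm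
      rw [List.eq_of_mem_replicate hx']
      exact hcs.1 d hd
    simp only [List.flatMap_cons]
    rw [merge_rep c (f c) (g c) _ _ (hlt f) (hlt g), ih hcs.2]

-- the two-pointer merge of two canonical lists is the canonical list of the pointwise min
theorem merge_canon (f g : Int → Nat) :
    pvMerge (pvCanon f) (pvCanon g) = pvCanon (fun v => min (f v) (g v)) :=
  merge_flat pvDigitsI (by decide) f g

theorem flatMap_replicate_single (v : Int) (c : Char) (h : pvToC v = [c]) (n : Nat) :
    (List.replicate n v).flatMap pvToC = List.replicate n c := by
  induction n with
  | zero => simp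
  | succ n ih => simp [List.replicate_succ, ih, h]

-- A's fold result vs B's post-processing of the same digit list (P = digits 9..1, n0 zeros)
theorem pv_coreI (P : List Int) (h0 : (0 : Int) ∉ P) (hm : ∀ v ∈ P, 0 ≤ v ∧ v ≤ 9) (n0 : Nat) :
    (if (if (decide (0 < n0) && (P.flatMap pvToC == ([] : List Char))) = true
           then P.flatMap pvToC ++ ['0'] else P.flatMap pvToC ++ List.replicate n0 '0') ≠ ([] : List Char)
       then String.ofList (if (decide (0 < n0) && (P.flatMap pvToC == ([] : List Char))) = true
           then P.flatMap pvToC ++ ['0'] else P.flatMap pvToC ++ List.replicate n0 '0')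
       else "-1")
    = (match P ++ List.replicate n0 (0 : Int) with
       | [] => "-1"
       | v :: rest => if v == 0 then "0" else String.ofList ((v :: rest).flatMap pvToC)) := by
  cases P with
  | nil =>
    cases n0 with
    | zero => rfl
    | succ m =>
      simp only [List.flatMap_nil, List.nil_append, List.replicate_succ, Nat.zero_lt_succ,
        decide_true, Bool.true_and, BEq.rfl, if_true]
      simp
  | cons v rest =>
    have hv0 : v ≠ 0 := fun h => h0 (h ▸ List.mem_cons_self)
    have hb := hm v List.mem_cons_self
    have hv : v = 1 ∨ v = 2 ∨ v = 3 ∨ v = 4 ∨ v = 5 ∨ v = 6 ∨ v = 7 ∨ v = 8 ∨ v = 9 := by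
      omega
    have hz : (List.replicate n0 (0 : Int)).flatMap pvToC = List.replicate n0 '0' :=
      flatMap_replicate_single 0 '0' rfl n0
    rcases hv with h|h|h|h|h|h|h|h|h <;> subst h <;>
      simp [List.flatMap_cons, List.flatMap_append, hz,
        show pvToC 1 = ['1'] from rfl, show pvToC 2 = ['2'] from rfl,
        show pvToC 3 = ['3'] from rfl, show pvToC 4 = ['4'] from rfl,
        show pvToC 5 = ['5'] from rfl, show pvToC 6 = ['6'] from rfl,
        show pvToC 7 = ['7'] from rfl, show pvToC 8 = ['8'] from rfl,
        show pvToC 9 = ['9'] from rfl]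

theorem solution_eq_alt (X Y : String) (pre : Pre_solution X Y) :
    solution X Y = solution_alt X Y := by
  unfold Pre_solution at pre
  rw [Bool.and_eq_true, List.all_eq_true, List.all_eq_true] at pre
  have hX : ∀ v ∈ X.toList.map pvDigitVal, 0 ≤ v ∧ v ≤ 9 := by
    intro v hv
    obtain ⟨c, hc, rfl⟩ := List.mem_map.mp hv
    exact digitVal_bounds c (pre.1 c hc)
  have hY : ∀ v ∈ Y.toList.map pvDigitVal, 0 ≤ v ∧ v ≤ 9 := by
    intro v hv
    obtain ⟨c, hc, rfl⟩ := List.mem_map.mp hv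
    exact digitVal_bounds c (pre.2 c hc)
  unfold solution solution_alt
  rw [show PySem.List.pyRange 9 (-1) (-1) = [9,8,7,6,5,4,3,2,1,0] by decide]
  rw [sorted_rev_eq_canon _ hX, sorted_rev_eq_canon _ hY]
  simp only [List.foldl_cons, List.foldl_nil,
    show ((9 : Int) == 0) = false from rfl, show ((8 : Int) == 0) = false from rfl,
    show ((7 : Int) == 0) = false from rfl, show ((6 : Int) == 0) = false from rfl,
    show ((5 : Int) == 0) = false from rfl, show ((4 : Int) == 0) = false from rfl,
    show ((3 : Int) == 0) = false from rfl, show ((2 : Int) == 0) = false from rfl,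
    show ((1 : Int) == 0) = false from rfl, show ((0 : Int) == 0) = true from rfl,
    Bool.false_and, Bool.true_and, Bool.false_eq_true, if_false,
    show (PySem.Int.toStr 9).toList = ['9'] from rfl, show (PySem.Int.toStr 8).toList = ['8'] from rfl,
    show (PySem.Int.toStr 7).toList = ['7'] from rfl, show (PySem.Int.toStr 6).toList = ['6'] from rfl,
    show (PySem.Int.toStr 5).toList = ['5'] from rfl, show (PySem.Int.toStr 4).toList = ['4'] from rfl,
    show (PySem.Int.toStr 3).toList = ['3'] from rfl, show (PySem.Int.toStr 2).toList = ['2'] from rfl,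
    show (PySem.Int.toStr 1).toList = ['1'] from rfl, show (PySem.Int.toStr 0).toList = ['0'] from rfl,
    PySem.List.pyRepeat_singleton,
    ← Nat.cast_min, Int.toNat_natCast, List.nil_append]
  rw [merge_canon]
  have hrw : ∀ (n9 n8 n7 n6 n5 n4 n3 n2 n1 : Nat),
      List.replicate n9 '9' ++ List.replicate n8 '8' ++ List.replicate n7 '7' ++
        List.replicate n6 '6' ++ List.replicate n5 '5' ++ List.replicate n4 '4' ++
        List.replicate n3 '3' ++ List.replicate n2 '2' ++ List.replicate n1 '1'
      = (List.replicate n9 (9:Int) ++ List.replicate n8 8 ++ List.replicate n7 7 ++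
          List.replicate n6 6 ++ List.replicate n5 5 ++ List.replicate n4 4 ++
          List.replicate n3 3 ++ List.replicate n2 2 ++ List.replicate n1 1).flatMap pvToC := by
    intro n9 n8 n7 n6 n5 n4 n3 n2 n1
    simp [List.flatMap_append,
      flatMap_replicate_single 9 '9' rfl, flatMap_replicate_single 8 '8' rfl,
      flatMap_replicate_single 7 '7' rfl, flatMap_replicate_single 6 '6' rfl,
      flatMap_replicate_single 5 '5' rfl, flatMap_replicate_single 4 '4' rfl,
      flatMap_replicate_single 3 '3' rfl, flatMap_replicate_single 2 '2' rfl,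
      flatMap_replicate_single 1 '1' rfl]
  simp only [pvCanon, pvDigitsI, List.flatMap_cons, List.flatMap_nil, List.append_nil]
  generalize min ((X.toList.map pvDigitVal).count 9) ((Y.toList.map pvDigitVal).count 9) = n9
  generalize min ((X.toList.map pvDigitVal).count 8) ((Y.toList.map pvDigitVal).count 8) = n8
  generalize min ((X.toList.map pvDigitVal).count 7) ((Y.toList.map pvDigitVal).count 7) = n7
  generalize min ((X.toList.map pvDigitVal).count 6) ((Y.toList.map pvDigitVal).count 6) = n6
  generalize min ((X.toList.map pvDigitVal).count 5) ((Y.toList.map pvDigitVal).count 5) = n5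
  generalize min ((X.toList.map pvDigitVal).count 4) ((Y.toList.map pvDigitVal).count 4) = n4
  generalize min ((X.toList.map pvDigitVal).count 3) ((Y.toList.map pvDigitVal).count 3) = n3
  generalize min ((X.toList.map pvDigitVal).count 2) ((Y.toList.map pvDigitVal).count 2) = n2
  generalize min ((X.toList.map pvDigitVal).count 1) ((Y.toList.map pvDigitVal).count 1) = n1
  generalize min ((X.toList.map pvDigitVal).count 0) ((Y.toList.map pvDigitVal).count 0) = n0
  rw [hrw n9 n8 n7 n6 n5 n4 n3 n2 n1]
  simp only [← List.append_assoc]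
  exact pv_coreI _ (by simp [List.mem_append, List.mem_replicate])
    (by intro v hv
        simp only [List.mem_append, List.mem_replicate] at hv
        omega) n0

-- ===== VERDICT (by name: the statement is the Claim_ definition above) =====
theorem solution_spec : Claim_equal_solution := by
  intro X Y _ pre
  exact solution_eq_alt X Y pre
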